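-- pv_equiv track=rewrite | github.com/InfiniteFightingGhost/Noctis | app/ml/model.py | _detect_sequence_checkpoint_format
-- ===== SOURCE A (Python) =====
-- from typing import Any, cast
--
-- def _detect_sequence_checkpoint_format(state_dict: dict[str, Any]) -> str:
--     has_primary = any(
--         key.startswith("primary_head.") or key.startswith("module.primary_head.")
--         for key in state_dict
--     )
--     has_aux = any(
--         key.startswith("aux_head.") or key.startswith("module.aux_head.") for key in state_dict
--     )
--     has_legacy_head = any(
--         key.startswith("head.") or key.startswith("module.head.") for key in state_dict
--     )
--     if has_primary or has_aux:
--         return "new"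
--     if has_legacy_head:
--         return "legacy"
--     raise ValueError("Unsupported sequence checkpoint format")
-- ===== SOURCE B (Python) =====
-- def _detect_sequence_checkpoint_format(state_dict):
--     # Single pass: return "new" on the first primary/aux key; remember legacy keys.
--     has_legacy = False
--     for key in state_dict:
--         if key.startswith(("primary_head.", "module.primary_head.",
--                            "aux_head.", "module.aux_head.")):
--             return "new"
--         if key.startswith(("head.", "module.head.")):
--             has_legacy = True
--     if has_legacy:
--         return "legacy"
--     raise ValueError("Unsupported sequence checkpoint format")
-- ===== Notes on version B (the rewrite author's own statement) =====
-- stated objective: simpler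
-- what changed: Replaces three separate any() scans over the dict with one loop that returns 'new' immediately on the first primary/aux key and carries a single legacy flag.
import Mathlib
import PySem

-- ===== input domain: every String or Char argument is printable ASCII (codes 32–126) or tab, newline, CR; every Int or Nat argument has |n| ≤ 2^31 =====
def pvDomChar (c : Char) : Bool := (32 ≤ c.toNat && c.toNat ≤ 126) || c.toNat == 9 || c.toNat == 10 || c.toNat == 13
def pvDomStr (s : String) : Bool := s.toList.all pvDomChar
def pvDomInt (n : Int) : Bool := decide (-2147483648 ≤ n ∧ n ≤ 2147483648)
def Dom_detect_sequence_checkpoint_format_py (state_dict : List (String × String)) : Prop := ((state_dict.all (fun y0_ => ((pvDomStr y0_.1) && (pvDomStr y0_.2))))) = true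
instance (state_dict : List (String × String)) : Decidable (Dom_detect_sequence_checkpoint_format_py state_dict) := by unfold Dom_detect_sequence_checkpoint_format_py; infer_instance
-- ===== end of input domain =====

-- B replaces A's three any() scans with one early-returning loop carrying a legacy flag (simpler).
-- On inputs with no head-like key Python A raises ValueError (and B does too): excluded by Pre_.

-- ===== PORT A =====
def detect_sequence_checkpoint_format_py (state_dict : List (String × String)) : String :=
  let has_primary := state_dict.any (fun kv =>
    PySem.Str.startswith kv.1 "primary_head." || PySem.Str.startswith kv.1 "module.primary_head.")
  let has_aux := state_dict.any (fun kv =>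
    PySem.Str.startswith kv.1 "aux_head." || PySem.Str.startswith kv.1 "module.aux_head.")
  let has_legacy_head := state_dict.any (fun kv =>
    PySem.Str.startswith kv.1 "head." || PySem.Str.startswith kv.1 "module.head.")
  if has_primary || has_aux then "new"
  else if has_legacy_head then "legacy"
  else ""  -- raise ValueError: excluded by Pre_

-- ===== PORT B =====
def pvAltLoop : List (String × String) → Bool → String
  | [], has_legacy => if has_legacy then "legacy" else ""  -- raise ValueError: excluded by Pre_
  | kv :: rest, has_legacy =>
    if PySem.Str.startswith kv.1 "primary_head." || PySem.Str.startswith kv.1 "module.primary_head."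
       || PySem.Str.startswith kv.1 "aux_head." || PySem.Str.startswith kv.1 "module.aux_head." then
      "new"
    else
      pvAltLoop rest (has_legacy
        || (PySem.Str.startswith kv.1 "head." || PySem.Str.startswith kv.1 "module.head."))

def detect_sequence_checkpoint_format_py_alt (state_dict : List (String × String)) : String :=
  pvAltLoop state_dict false

-- ===== PRECONDITION & SPEC =====
-- Pre_ excludes exactly the inputs with no head-like key, on which A raises ValueError.
def Pre_detect_sequence_checkpoint_format_py (state_dict : List (String × String)) : Prop :=
  (state_dict.any (fun kv =>
    PySem.Str.startswith kv.1 "primary_head." || PySem.Str.startswith kv.1 "module.primary_head."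
    || PySem.Str.startswith kv.1 "aux_head." || PySem.Str.startswith kv.1 "module.aux_head."
    || PySem.Str.startswith kv.1 "head." || PySem.Str.startswith kv.1 "module.head.")) = true
instance (state_dict : List (String × String)) : Decidable (Pre_detect_sequence_checkpoint_format_py state_dict) := by
  unfold Pre_detect_sequence_checkpoint_format_py; infer_instance
def pvWitness_detect_sequence_checkpoint_format_py : (List (String × String)) := [("head.weight", "v")]

def Spec_detect_sequence_checkpoint_format_py (state_dict : List (String × String)) (out : String) : Prop := out = detect_sequence_checkpoint_format_py_alt state_dict
instance (state_dict : List (String × String)) (out : String) : Decidable (Spec_detect_sequence_checkpoint_format_py state_dict out) := by unfold Spec_detect_sequence_checkpoint_format_py; infer_instance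

-- ===== CLAIM (what is proved, stated in full; the proofs are below) =====
def Claim_equal_detect_sequence_checkpoint_format_py : Prop := ∀ (state_dict : List (String × String)), Dom_detect_sequence_checkpoint_format_py state_dict → Pre_detect_sequence_checkpoint_format_py state_dict → Spec_detect_sequence_checkpoint_format_py state_dict (detect_sequence_checkpoint_format_py state_dict)

-- ===== LEMMAS AND PROOFS =====

-- ===== VERDICT (by name: the statement is the Claim_ definition above) =====
lemma pv_any_split (l : List (String × String)) (f g : String × String → Bool) :
    l.any (fun x => f x || g x) = (l.any f || l.any g) := by
  induction l with
  | nil => simp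
  | cons h t ih =>
    simp only [List.any_cons, ih]
    cases f h <;> cases g h <;> simp

lemma pvAltLoop_eq (l : List (String × String)) (legacy : Bool) :
    pvAltLoop l legacy =
      if l.any (fun kv =>
          PySem.Str.startswith kv.1 "primary_head." || PySem.Str.startswith kv.1 "module.primary_head."
          || PySem.Str.startswith kv.1 "aux_head." || PySem.Str.startswith kv.1 "module.aux_head.") then "new"
      else if legacy || l.any (fun kv =>
          PySem.Str.startswith kv.1 "head." || PySem.Str.startswith kv.1 "module.head.") then "legacy"
      else "" := by
  induction l generalizing legacy with
  | nil => simp [pvAltLoop]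
  | cons h t ih =>
    rw [show pvAltLoop (h :: t) legacy =
        (if PySem.Str.startswith h.1 "primary_head." || PySem.Str.startswith h.1 "module.primary_head."
            || PySem.Str.startswith h.1 "aux_head." || PySem.Str.startswith h.1 "module.aux_head." then "new"
         else pvAltLoop t (legacy
            || (PySem.Str.startswith h.1 "head." || PySem.Str.startswith h.1 "module.head."))) from rfl]
    by_cases hn : (PySem.Str.startswith h.1 "primary_head." || PySem.Str.startswith h.1 "module.primary_head."
        || PySem.Str.startswith h.1 "aux_head." || PySem.Str.startswith h.1 "module.aux_head.") = true
    · rw [if_pos hn, if_pos (by rw [List.any_cons, hn, Bool.true_or])]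
    · have hn' := Bool.not_eq_true _ |>.mp hn
      rw [if_neg hn, ih, List.any_cons, hn', Bool.false_or, List.any_cons]
      simp only [Bool.or_assoc]

theorem detect_sequence_checkpoint_format_py_spec : Claim_equal_detect_sequence_checkpoint_format_py := by
  intro sd _ _
  show detect_sequence_checkpoint_format_py sd = detect_sequence_checkpoint_format_py_alt sd
  unfold detect_sequence_checkpoint_format_py detect_sequence_checkpoint_format_py_alt
  have hfun : (fun kv : String × String =>
      PySem.Str.startswith kv.1 "primary_head." || PySem.Str.startswith kv.1 "module.primary_head."
      || PySem.Str.startswith kv.1 "aux_head." || PySem.Str.startswith kv.1 "module.aux_head.") =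
    (fun kv : String × String =>
      (PySem.Str.startswith kv.1 "primary_head." || PySem.Str.startswith kv.1 "module.primary_head.")
      || (PySem.Str.startswith kv.1 "aux_head." || PySem.Str.startswith kv.1 "module.aux_head.")) :=
    funext (fun kv => Bool.or_assoc _ _ _)
  conv_rhs => rw [pvAltLoop_eq, Bool.false_or, hfun, pv_any_split]
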